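-- pv_equiv track=rewrite | github.com/aniket0951/LeetcodePractise | GeeksProblem/FAANG/FAANGArrays.py | CountOfTriplest
-- ===== SOURCE A (Python) =====
-- def CountOfTriplest(arr):
--     count = 0
--
--     s = set(arr)
--
--     for i in range(len(arr) - 1):
--         for j in range(i+1, len(arr)):
--             if arr[i] + arr[j] in s:
--                 count += 1
--     return count
-- ===== SOURCE B (Python) =====
-- def CountOfTriplest(arr):
--     s = set(arr)
--     cnt = {}
--     for x in arr:
--         cnt[x] = cnt.get(x, 0) + 1
--     count = 0
--     for x in arr:
--         cnt[x] = cnt[x] - 1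
--         for w in {t - x for t in s}:
--             count += cnt.get(w, 0)
--     return count
-- ===== Notes on version B (the rewrite author's own statement) =====
-- stated objective: alternative
-- what changed: B replaces A's double index loop over pairs with a value-frequency dictionary: it builds a counter of arr, then for each element x decrements its count (so the dict holds the suffix multiset) and adds the suffix counts of the distinct shifted targets {t - x : t in set(arr)}, giving O(n*|set(arr)|) instead of O(n^2).
import Mathlib
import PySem

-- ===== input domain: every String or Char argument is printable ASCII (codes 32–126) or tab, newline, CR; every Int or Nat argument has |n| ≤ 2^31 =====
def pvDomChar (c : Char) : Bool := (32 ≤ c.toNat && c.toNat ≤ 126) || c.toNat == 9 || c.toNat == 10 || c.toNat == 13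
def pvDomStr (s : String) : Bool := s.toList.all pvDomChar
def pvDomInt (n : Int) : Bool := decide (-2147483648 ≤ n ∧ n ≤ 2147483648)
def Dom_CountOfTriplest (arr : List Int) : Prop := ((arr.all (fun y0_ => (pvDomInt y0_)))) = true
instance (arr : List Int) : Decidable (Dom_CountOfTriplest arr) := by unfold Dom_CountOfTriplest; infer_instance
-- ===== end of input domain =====

-- B replaces A's double index loop with a frequency dictionary over values (suffix counter),
-- summing suffix counts of the distinct shifted targets; objective: alternative algorithm.

-- ===== PORT A =====
def CountOfTriplest (arr : List Int) : Int :=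
  let s := PySem.Set.ofList arr
  (PySem.List.pyRange 0 ((arr.length : Int) - 1) 1).foldl (fun count i =>
    (PySem.List.pyRange (i + 1) (arr.length : Int) 1).foldl (fun count j =>
      if PySem.Set.contains s (PySem.List.pyGetD arr i 0 + PySem.List.pyGetD arr j 0)
      then count + 1 else count) count) 0

-- ===== PORT B =====
def CountOfTriplest_alt (arr : List Int) : Int :=
  let s := PySem.Set.ofList arr
  let cnt0 := arr.foldl (fun d x => d.insert x (d.getD x 0 + 1)) PySem.Dict.empty
  (arr.foldl (fun (st : PySem.Dict Int Int × Int) x =>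
      let cnt := st.1.modify x 0 (fun v => v - 1)
      (cnt, (PySem.Set.ofList (s.map (fun t => t - x))).foldl
              (fun c w => c + cnt.getD w 0) st.2))
    (cnt0, 0)).2

-- ===== PRECONDITION & SPEC =====
def Spec_CountOfTriplest (arr : List Int) (out : Int) : Prop := out = CountOfTriplest_alt arr
instance (arr : List Int) (out : Int) : Decidable (Spec_CountOfTriplest arr out) := by unfold Spec_CountOfTriplest; infer_instance

-- ===== CLAIM (what is proved, stated in full; the proofs are below) =====
def Claim_equal_CountOfTriplest : Prop := ∀ (arr : List Int), Dom_CountOfTriplest arr → Spec_CountOfTriplest arr (CountOfTriplest arr)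

-- ===== LEMMAS AND PROOFS =====

-- reference pair count: for x :: r, pairs of x with each later y such that x+y ∈ s, plus pairs inside r
def pairCount (s : List Int) : List Int → Int
  | [] => 0
  | x :: r => (r.countP (fun y => PySem.Set.contains s (x + y)) : Int) + pairCount s r

theorem pairCount_short (s : List Int) (l : List Int) (h : l.length ≤ 1) : pairCount s l = 0 := by
  match l, h with
  | [], _ => rfl
  | [a], _ => simp [pairCount]

-- Σ_{w ∈ W} (if w = y) = [y ∈ W] for nodup W
theorem sum_ind (W : List Int) (hW : W.Nodup) (y : Int) :
    (W.map (fun w => if w = y then (1 : Int) else 0)).sum = if y ∈ W then (1 : Int) else 0 := by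
  induction W with
  | nil => simp
  | cons w W ih =>
    rcases List.nodup_cons.mp hW with ⟨hw, hW'⟩
    by_cases h : w = y
    · subst h
      simp [List.map_cons, ih hW', hw]
    · simp only [List.map_cons, List.sum_cons, if_neg h, zero_add, ih hW', List.mem_cons]
      by_cases hy : y ∈ W <;> simp [hy, Ne.symm h]

-- Σ_{w ∈ W} count w l = countP (· ∈ W) l for nodup W
theorem sum_count (W : List Int) (hW : W.Nodup) (l : List Int) :
    (W.map (fun w => (l.count w : Int))).sum = (l.countP (fun y => decide (y ∈ W)) : Int) := by
  induction l with
  | nil => simp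
  | cons y r ih =>
    have h1 : (W.map (fun w => ((y :: r).count w : Int))).sum
        = (W.map (fun w => (r.count w : Int))).sum
          + (W.map (fun w => if w = y then (1 : Int) else 0)).sum := by
      rw [← List.sum_map_add]
      apply congrArg List.sum
      apply List.map_congr_left
      intro w _
      by_cases h : w = y
      · subst h; simp
      · simp [h, Ne.symm h]
    rw [h1, ih, sum_ind W hW y, List.countP_cons]
    by_cases hy : y ∈ W <;> simp [hy]

-- membership in the shifted target set
theorem mem_shift (s : List Int) (x y : Int) :
    y ∈ PySem.Set.ofList (s.map (fun t => t - x)) ↔ x + y ∈ s := by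
  rw [PySem.Set.mem_ofList, List.mem_map]
  constructor
  · rintro ⟨t, ht, rfl⟩; simpa using ht
  · intro h; exact ⟨x + y, h, by ring⟩

-- B's main loop: cnt holds the multiset of the remaining elements l
theorem B_loop (s : List Int) (l : List Int) (cnt : PySem.Dict Int Int) (acc : Int)
    (hc : ∀ v, cnt.getD v 0 = (l.count v : Int)) :
    (l.foldl (fun (st : PySem.Dict Int Int × Int) x =>
        let cnt := st.1.modify x 0 (fun v => v - 1)
        (cnt, (PySem.Set.ofList (s.map (fun t => t - x))).foldl
                (fun c w => c + cnt.getD w 0) st.2)) (cnt, acc)).2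
      = acc + pairCount s l := by
  induction l generalizing cnt acc with
  | nil => simp [pairCount]
  | cons x r ih =>
    simp only [List.foldl_cons]
    set cnt' := cnt.modify x 0 (fun v => v - 1) with hcnt'
    have hc' : ∀ v, cnt'.getD v 0 = (r.count v : Int) := by
      intro v
      rw [hcnt', PySem.Dict.getD_modify]
      by_cases h : v = x
      · subst h
        rw [if_pos rfl, hc v]
        simp
      · rw [if_neg h, hc v]
        simp [Ne.symm h]
    have hsum : (PySem.Set.ofList (s.map (fun t => t - x))).foldl
        (fun c w => c + cnt'.getD w 0) acc
        = acc + (r.countP (fun y => PySem.Set.contains s (x + y)) : Int) := by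
      rw [PySem.List.foldl_add (g := fun w => cnt'.getD w 0)]
      congr 1
      have hmapeq : (PySem.Set.ofList (s.map (fun t => t - x))).map (fun w => cnt'.getD w 0)
          = (PySem.Set.ofList (s.map (fun t => t - x))).map (fun w => (r.count w : Int)) := by
        apply List.map_congr_left
        intro w _
        exact hc' w
      rw [hmapeq, sum_count _ (PySem.Set.nodup_ofList _) r]
      congr 1
      apply List.countP_congr
      intro y _
      simp only [decide_eq_true_eq, mem_shift s x y, PySem.Set.contains_iff]
    rw [ih cnt' (((PySem.Set.ofList (s.map (fun t => t - x))).foldl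
          (fun c w => c + cnt'.getD w 0) acc)) hc', hsum, pairCount]
    ring

-- B equals pairCount
theorem B_eq (arr : List Int) :
    CountOfTriplest_alt arr = pairCount (PySem.Set.ofList arr) arr := by
  unfold CountOfTriplest_alt
  simp only []
  rw [PySem.Dict.foldl_insert_getD_add_one_eq_counter]
  rw [B_loop (PySem.Set.ofList arr) arr (PySem.Dict.counter arr) 0
      (fun v => PySem.Dict.getD_counter arr v)]
  ring

-- A side: inner range count equals countP over the dropped tail
theorem inner_count (arr : List Int) (q : Int → Bool) :
    ∀ (a : Nat), a ≤ arr.length →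
    (PySem.List.pyRange (a : Int) (arr.length : Int) 1).countP
        (fun j => q (PySem.List.pyGetD arr j 0))
      = (arr.drop a).countP q := by
  intro a ha
  induction h : arr.length - a generalizing a with
  | zero =>
    have : a = arr.length := by omega
    subst this
    rw [List.drop_length]
    have hemp : PySem.List.pyRange (arr.length : Int) (arr.length : Int) 1 = [] := by
      apply List.eq_nil_iff_forall_not_mem.mpr
      intro i hi
      have := (PySem.List.mem_pyRange_one).mp hi
      omega
    rw [hemp]; rfl
  | succ m ih =>
    have halt : a < arr.length := by omega
    rw [PySem.List.pyRange_one_cons (by exact_mod_cast halt)]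
    rw [List.countP_cons]
    have hget : PySem.List.pyGetD arr (a : Int) 0 = arr[a] := by
      rw [PySem.List.pyGetD_natCast]
      exact List.getD_eq_getElem arr 0 halt
    have hdrop : arr.drop a = arr[a] :: arr.drop (a + 1) := List.drop_eq_getElem_cons halt
    have hcast : ((a : Int) + 1) = ((a + 1 : Nat) : Int) := by push_cast; ring
    rw [hcast, ih (a + 1) (by omega) (by omega), hdrop, List.countP_cons, hget]

-- A side: outer sum from index k equals pairCount of the dropped tail
theorem outer_sum (arr : List Int) :
    ∀ (k : Nat), k ≤ arr.length →
    ((PySem.List.pyRange (k : Int) ((arr.length : Int) - 1) 1).map (fun i =>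
        ((PySem.List.pyRange (i + 1) (arr.length : Int) 1).countP
          (fun j => PySem.Set.contains (PySem.Set.ofList arr)
            (PySem.List.pyGetD arr i 0 + PySem.List.pyGetD arr j 0)) : Int))).sum
      = pairCount (PySem.Set.ofList arr) (arr.drop k) := by
  intro k hk
  induction h : arr.length - k generalizing k with
  | zero =>
    have hemp : PySem.List.pyRange (k : Int) ((arr.length : Int) - 1) 1 = [] := by
      apply List.eq_nil_iff_forall_not_mem.mpr
      intro i hi
      have := (PySem.List.mem_pyRange_one).mp hi
      omega
    rw [hemp]
    have : k = arr.length := by omega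
    subst this
    rw [List.drop_length]; rfl
  | succ m ih =>
    have hklt : k < arr.length := by omega
    by_cases hlast : k + 1 = arr.length
    · -- only one element left: outer range is empty, pairCount of a singleton is 0
      have hemp : PySem.List.pyRange (k : Int) ((arr.length : Int) - 1) 1 = [] := by
        apply List.eq_nil_iff_forall_not_mem.mpr
        intro i hi
        have := (PySem.List.mem_pyRange_one).mp hi
        omega
      rw [hemp]
      have hlen : (arr.drop k).length ≤ 1 := by
        rw [List.length_drop]; omega
      rw [pairCount_short _ _ hlen]; rfl
    · have hklt1 : (k : Int) < (arr.length : Int) - 1 := by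
        have : k + 1 < arr.length := by omega
        omega
      rw [PySem.List.pyRange_one_cons hklt1, List.map_cons, List.sum_cons]
      have hcast : ((k : Int) + 1) = ((k + 1 : Nat) : Int) := by push_cast; ring
      rw [hcast, ih (k + 1) (by omega) (by omega)]
      have hget : PySem.List.pyGetD arr (k : Int) 0 = arr[k] := by
        rw [PySem.List.pyGetD_natCast]
        exact List.getD_eq_getElem arr 0 hklt
      have hinner := inner_count arr
        (fun y => PySem.Set.contains (PySem.Set.ofList arr) (arr[k] + y)) (k + 1) (by omega)
      have hdrop : arr.drop k = arr[k] :: arr.drop (k + 1) := List.drop_eq_getElem_cons hklt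
      rw [hdrop]
      show ((PySem.List.pyRange ((k + 1 : Nat) : Int) (arr.length : Int) 1).countP
          (fun j => PySem.Set.contains (PySem.Set.ofList arr)
            (PySem.List.pyGetD arr (k : Int) 0 + PySem.List.pyGetD arr j 0)) : Int)
          + pairCount (PySem.Set.ofList arr) (arr.drop (k + 1))
        = pairCount (PySem.Set.ofList arr) (arr[k] :: arr.drop (k + 1))
      rw [pairCount]
      congr 1
      rw [hget]
      have hh : ((PySem.List.pyRange ((k + 1 : Nat) : Int) (arr.length : Int) 1).countP
          (fun j => PySem.Set.contains (PySem.Set.ofList arr)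
            (arr[k] + PySem.List.pyGetD arr j 0)))
          = (arr.drop (k + 1)).countP
              (fun y => PySem.Set.contains (PySem.Set.ofList arr) (arr[k] + y)) := hinner
      exact_mod_cast hh

-- A equals pairCount
theorem A_eq (arr : List Int) :
    CountOfTriplest arr = pairCount (PySem.Set.ofList arr) arr := by
  unfold CountOfTriplest
  simp only []
  have hbody : ∀ (count : Int) (i : Int),
      i ∈ PySem.List.pyRange 0 ((arr.length : Int) - 1) 1 →
      (PySem.List.pyRange (i + 1) (arr.length : Int) 1).foldl (fun count j =>
        if PySem.Set.contains (PySem.Set.ofList arr)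
            (PySem.List.pyGetD arr i 0 + PySem.List.pyGetD arr j 0)
        then count + 1 else count) count
      = count + ((PySem.List.pyRange (i + 1) (arr.length : Int) 1).countP
          (fun j => PySem.Set.contains (PySem.Set.ofList arr)
            (PySem.List.pyGetD arr i 0 + PySem.List.pyGetD arr j 0)) : Int) := by
    intro count i _
    exact PySem.List.foldl_if_add_one _ _ _
  have hco : (PySem.List.pyRange 0 ((arr.length : Int) - 1) 1).foldl (fun count i =>
      (PySem.List.pyRange (i + 1) (arr.length : Int) 1).foldl (fun count j =>
        if PySem.Set.contains (PySem.Set.ofList arr)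
            (PySem.List.pyGetD arr i 0 + PySem.List.pyGetD arr j 0)
        then count + 1 else count) count) 0
    = (PySem.List.pyRange 0 ((arr.length : Int) - 1) 1).foldl (fun count i =>
      count + ((PySem.List.pyRange (i + 1) (arr.length : Int) 1).countP
          (fun j => PySem.Set.contains (PySem.Set.ofList arr)
            (PySem.List.pyGetD arr i 0 + PySem.List.pyGetD arr j 0)) : Int)) 0 :=
    PySem.List.foldl_congr_mem _ _ _ _ (fun acc x hx => hbody acc x hx)
  have hmain := outer_sum arr 0 (by omega)
  simp only [Nat.cast_zero, List.drop_zero] at hmain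
  rw [hco, PySem.List.foldl_add, hmain, zero_add]

-- ===== VERDICT (by name: the statement is the Claim_ definition above) =====
theorem CountOfTriplest_spec : Claim_equal_CountOfTriplest := by
  intro arr _
  unfold Spec_CountOfTriplest
  rw [A_eq, B_eq]
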